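-- pv_equiv track=rewrite | github.com/kubamarchut/best-net-stenography-project | encoder.py | space_encoding
-- ===== SOURCE A (Python) =====
-- def space_encoding(text):
--     encoded_msg = []
--     for char in text:
--         ascii_value = ord(char)
--         binary_string = format(ascii_value, "08b")
--         for digit in binary_string:
--             if digit == "0":
--                 encoded_msg.append(" ")
--             else:
--                 encoded_msg.append("  ")
--
--     return encoded_msg
-- ===== SOURCE B (Python) =====
-- def space_encoding(text):
--     out = []
--     for c in text:
--         v = ord(c)
--         n = max(8, v.bit_length())
--         for k in range(n - 1, -1, -1):
--             out.append(" " if (v >> k) & 1 == 0 else "  ")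
--     return out
-- ===== Notes on version B (the rewrite author's own statement) =====
-- stated objective: alternative
-- what changed: B extracts each bit arithmetically ((v >> k) & 1 over a descending range of bit positions) instead of formatting the code point into a binary string and dispatching on its characters.
import Mathlib
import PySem

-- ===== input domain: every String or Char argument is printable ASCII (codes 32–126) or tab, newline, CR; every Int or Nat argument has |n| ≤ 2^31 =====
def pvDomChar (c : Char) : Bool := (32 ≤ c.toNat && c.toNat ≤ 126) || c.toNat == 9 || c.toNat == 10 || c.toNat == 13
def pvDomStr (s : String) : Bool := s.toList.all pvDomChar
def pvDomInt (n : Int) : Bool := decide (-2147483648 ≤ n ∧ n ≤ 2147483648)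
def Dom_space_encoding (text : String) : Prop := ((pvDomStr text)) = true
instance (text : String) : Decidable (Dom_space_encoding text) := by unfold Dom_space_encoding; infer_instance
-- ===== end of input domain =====

-- B extracts each bit arithmetically instead of formatting a binary string; objective: alternative decomposition.

-- ===== PORT A =====
-- binary digits of v, most significant first (format(v, "b") core); fuel-based structural
-- recursion (fuel ≥ v suffices since the argument at least halves each step)
def pvBinDigitsAux : Nat → Nat → List Char
  | 0, _ => []
  | _+1, 0 => []
  | fuel+1, n+1 => pvBinDigitsAux fuel ((n+1)/2) ++ [if (n+1) % 2 == 1 then '1' else '0']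

-- format(v, "08b"): binary string left-padded with '0' to width 8
def pvBin8 (v : Nat) : List Char :=
  let d := if v = 0 then ['0'] else pvBinDigitsAux v v
  List.replicate (8 - d.length) '0' ++ d

def space_encoding (text : String) : List String :=
  text.toList.foldl (fun encoded_msg char =>
    let asciiValue := char.toNat
    let binaryString := pvBin8 asciiValue
    binaryString.foldl (fun acc digit =>
      if digit == '0' then acc ++ [" "] else acc ++ ["  "]) encoded_msg) []

-- ===== PORT B =====
def space_encoding_alt (text : String) : List String :=
  text.toList.foldl (fun out c =>
    let v := c.toNat
    let n : Nat := max 8 v.size          -- max(8, v.bit_length())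
    (PySem.List.pyRange ((n : Int) - 1) (-1) (-1)).foldl
      (fun acc k => acc ++ [if (v >>> k.toNat) &&& 1 == 0 then " " else "  "]) out) []

-- ===== PRECONDITION & SPEC =====
def Spec_space_encoding (text : String) (out : List String) : Prop := out = space_encoding_alt text
instance (text : String) (out : List String) : Decidable (Spec_space_encoding text out) := by unfold Spec_space_encoding; infer_instance

-- ===== CLAIM (what is proved, stated in full; the proofs are below) =====
def Claim_equal_space_encoding : Prop := ∀ (text : String), Dom_space_encoding text → Spec_space_encoding text (space_encoding text)

-- ===== LEMMAS AND PROOFS =====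
-- a foldl whose step only appends to the accumulator flattens to acc ++ flatMap
theorem pvFoldlAccOut {α β : Type} (step : List α → β → List α) (f : β → List α)
    (l : List β) (acc : List α) (h : ∀ a b, step a b = a ++ f b) :
    l.foldl step acc = acc ++ l.flatMap f := by
  induction l generalizing acc with
  | nil => simp
  | cons b t ih => simp [List.foldl, h, ih]

def pvFA (d : Char) : List String := if d == '0' then [" "] else ["  "]

def pvPerA (c : Char) : List String := (pvBin8 c.toNat).flatMap pvFA

def pvFB (v : Nat) (k : Int) : List String := [if (v >>> k.toNat) &&& 1 == 0 then " " else "  "]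

def pvPerB (c : Char) : List String :=
  (PySem.List.pyRange ((max 8 c.toNat.size : Nat) - 1 : Int) (-1) (-1)).flatMap (pvFB c.toNat)

theorem pvA_flat (text : String) : space_encoding text = text.toList.flatMap pvPerA := by
  unfold space_encoding
  rw [pvFoldlAccOut _ pvPerA _ [] ?_]
  · simp
  · intro a c
    show (pvBin8 c.toNat).foldl _ a = a ++ pvPerA c
    rw [pvFoldlAccOut _ pvFA _ a ?_]
    · rfl
    · intro x d; by_cases hb : d == '0' <;> simp [pvFA, hb]

theorem pvB_flat (text : String) : space_encoding_alt text = text.toList.flatMap pvPerB := by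
  unfold space_encoding_alt
  rw [pvFoldlAccOut _ pvPerB _ [] ?_]
  · simp
  · intro a c
    show (PySem.List.pyRange ((max 8 c.toNat.size : Nat) - 1 : Int) (-1) (-1)).foldl _ a
        = a ++ pvPerB c
    exact (pvFoldlAccOut _ (pvFB c.toNat) _ a (fun _ _ => rfl)).trans rfl

theorem pvPerChar : ∀ v : Nat, v < 127 →
    (pvBin8 v).flatMap pvFA
      = (PySem.List.pyRange ((max 8 v.size : Nat) - 1 : Int) (-1) (-1)).flatMap (pvFB v) := by
  decide

theorem pvFlatEq : ∀ l : List Char, (∀ c ∈ l, pvDomChar c = true) →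
    l.flatMap pvPerA = l.flatMap pvPerB := by
  intro l hall
  induction l with
  | nil => rfl
  | cons c t ih =>
    have hc : pvDomChar c = true := hall c (by simp)
    have hlt : c.toNat < 127 := by
      unfold pvDomChar at hc
      simp only [Bool.or_eq_true, Bool.and_eq_true, decide_eq_true_eq, beq_iff_eq] at hc
      omega
    simp only [List.flatMap_cons]
    rw [ih (fun x hx => hall x (by simp [hx]))]
    congr 1
    exact pvPerChar c.toNat hlt

-- ===== VERDICT (by name: the statement is the Claim_ definition above) =====
theorem space_encoding_spec : Claim_equal_space_encoding := by
  intro text hdom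
  unfold Spec_space_encoding
  rw [pvA_flat, pvB_flat]
  apply pvFlatEq
  have := hdom
  unfold Dom_space_encoding pvDomStr at this
  simpa [List.all_eq_true] using this
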